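-- pv_equiv track=rewrite | github.com/A-Jiango/longchat-local | chat_gui.py | _split_display_units
-- ===== SOURCE A (Python) =====
-- def _split_display_units(text: str) -> list[str]:
--     units: list[str] = []
--     index = 0
--     while index < len(text):
--         if text.startswith("```", index):
--             units.append("```")
--             index += 3
--             continue
--         if text.startswith("**", index) or text.startswith("__", index) or text.startswith("$$", index):
--             units.append(text[index : index + 2])
--             index += 2
--             continue
--         if text[index] == "\\":
--             end = index + 1
--             while end < len(text) and text[end].isalpha():
--                 end += 1
--             if end > index + 1:
--                 units.append(text[index:end])
--                 index = end
--                 continue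
--         units.append(text[index])
--         index += 1
--     return units
-- ===== SOURCE B (Python) =====
-- import re
--
-- # One compiled alternation, ordered: 3-char marker, 2-char markers, backslash
-- # followed by a letter run ([^\W\d_] = Unicode letters, = [a-zA-Z] on ASCII),
-- # then single-char catch-all (DOTALL so '.' also eats newlines).
-- _UNIT_RE = re.compile(r'```|\*\*|__|\$\$|\\[^\W\d_]+|.', re.DOTALL)
--
--
-- def _split_display_units(text: str) -> list[str]:
--     return _UNIT_RE.findall(text)
-- ===== Notes on version B (the rewrite author's own statement) =====
-- stated objective: idiomatic
-- what changed: Replaced the manual index/while loop with startswith probes and an inner isalpha scan by a single compiled regex alternation (```|\*\*|__|\$\$|\\[^\W\d_]+|., DOTALL) whose findall produces the unit list in one engine pass.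
import Mathlib
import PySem

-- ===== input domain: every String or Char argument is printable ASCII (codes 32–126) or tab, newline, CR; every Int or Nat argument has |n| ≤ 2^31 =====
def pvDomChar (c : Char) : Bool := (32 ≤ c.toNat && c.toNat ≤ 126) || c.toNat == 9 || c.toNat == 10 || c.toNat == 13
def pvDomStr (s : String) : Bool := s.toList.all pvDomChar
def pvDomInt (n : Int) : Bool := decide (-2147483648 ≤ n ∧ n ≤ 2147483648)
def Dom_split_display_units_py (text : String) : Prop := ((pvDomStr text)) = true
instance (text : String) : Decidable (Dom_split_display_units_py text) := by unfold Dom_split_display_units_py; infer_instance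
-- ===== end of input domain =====

-- B replaces A's manual index/while loop by a single ordered-alternation regex
-- tokenizer (idiomatic; measured faster by a constant factor in Python).


-- ===== PORT A =====
-- inner `while end < len(text) and text[end].isalpha(): end += 1`: number of
-- leading alpha chars of the suffix starting at index+1
def pvAlphaRun (cs : List Char) : Nat :=
  match cs with
  | [] => 0
  | c :: rest => if PySem.Chars.isalpha c then pvAlphaRun rest + 1 else 0

-- A's while loop over `index`; the advancing index is represented by the
-- remaining suffix text[index:] (text.startswith(p, index) = prefix test on it,
-- text[index:index+k] = its take k), with the growing `units` accumulator.
def pvSplitA (rest : List Char) (units : List String) : List String :=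
  match rest with
  | [] => units
  | c :: tl =>
    if ['`', '`', '`'].isPrefixOf (c :: tl) then
      pvSplitA ((c :: tl).drop 3) (units ++ ["```"])
    else if ['*', '*'].isPrefixOf (c :: tl) || ['_', '_'].isPrefixOf (c :: tl)
        || ['$', '$'].isPrefixOf (c :: tl) then
      pvSplitA ((c :: tl).drop 2) (units ++ [String.ofList ((c :: tl).take 2)])
    else if c = '\\' then
      let n := pvAlphaRun tl
      if 0 < n then
        pvSplitA (tl.drop n) (units ++ [String.ofList (c :: tl.take n)])
      else
        pvSplitA tl (units ++ [String.ofList [c]])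
    else
      pvSplitA tl (units ++ [String.ofList [c]])
termination_by rest.length
decreasing_by all_goals simp

def split_display_units_py (text : String) : List String :=
  pvSplitA text.toList []

-- ===== PORT B =====
-- the regex scanner: at each position the ordered alternation
-- ```|\*\*|__|\$\$|\\[^\W\d_]+|.  tries its branches in order and consumes the
-- first match ([^\W\d_] is exactly isalpha on the ASCII domain; '.' with
-- DOTALL matches any one char); findall = repeat until the input is exhausted.
def pvSplitB : List Char → List String
  | '`' :: '`' :: '`' :: rest => "```" :: pvSplitB rest
  | '*' :: '*' :: rest => "**" :: pvSplitB rest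
  | '_' :: '_' :: rest => "__" :: pvSplitB rest
  | '$' :: '$' :: rest => "$$" :: pvSplitB rest
  | '\\' :: rest =>
    let run := rest.takeWhile PySem.Chars.isalpha
    if run.isEmpty then "\\" :: pvSplitB rest
    else String.ofList ('\\' :: run) :: pvSplitB (rest.dropWhile PySem.Chars.isalpha)
  | c :: rest => String.ofList [c] :: pvSplitB rest
  | [] => []
termination_by cs => cs.length
decreasing_by all_goals simp <;> first | omega | exact List.length_dropWhile_le _ _

def split_display_units_py_alt (text : String) : List String :=
  pvSplitB text.toList

-- ===== PRECONDITION & SPEC =====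
def Spec_split_display_units_py (text : String) (out : List String) : Prop := out = split_display_units_py_alt text
instance (text : String) (out : List String) : Decidable (Spec_split_display_units_py text out) := by unfold Spec_split_display_units_py; infer_instance

-- ===== CLAIM (what is proved, stated in full; the proofs are below) =====
def Claim_equal_split_display_units_py : Prop := ∀ (text : String), Dom_split_display_units_py text → Spec_split_display_units_py text (split_display_units_py text)

-- ===== LEMMAS AND PROOFS =====

theorem pvAlphaRun_take (cs : List Char) :
    cs.take (pvAlphaRun cs) = cs.takeWhile PySem.Chars.isalpha := by
  induction cs with
  | nil => rfl
  | cons c rest ih =>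
    simp only [pvAlphaRun, List.takeWhile]
    split <;> simp_all

theorem pvAlphaRun_drop (cs : List Char) :
    cs.drop (pvAlphaRun cs) = cs.dropWhile PySem.Chars.isalpha := by
  induction cs with
  | nil => rfl
  | cons c rest ih =>
    simp only [pvAlphaRun, List.dropWhile]
    split <;> simp_all

theorem pvSplit_agree (cs : List Char) (units : List String) :
    pvSplitA cs units = units ++ pvSplitB cs := by
  induction cs using pvSplitB.induct generalizing units
  case case1 rest ih => simp [pvSplitA, pvSplitB, ih]
  case case2 rest ih => simp [pvSplitA, pvSplitB, ih]
  case case3 rest ih => simp [pvSplitA, pvSplitB, ih]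
  case case4 rest ih => simp [pvSplitA, pvSplitB, ih]
  case case5 rest run h ih =>
    cases rest with
    | nil => simp [pvSplitA, pvSplitB, pvAlphaRun, ih]
    | cons a t =>
      cases hA : PySem.Chars.isalpha a with
      | true =>
        have h' : (List.takeWhile PySem.Chars.isalpha (a :: t)).isEmpty = true := h
        simp [List.takeWhile, hA] at h'
      | false => simp [pvSplitA, pvSplitB, pvAlphaRun, List.takeWhile, hA, ih]
  case case6 rest run h ih =>
    cases rest with
    | nil => exact absurd rfl h
    | cons a t =>
      cases hA : PySem.Chars.isalpha a with
      | false =>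
        exact absurd (show (List.takeWhile PySem.Chars.isalpha (a :: t)).isEmpty = true by
          simp [List.takeWhile, hA]) h
      | true =>
        have hpos : 0 < pvAlphaRun (a :: t) := by simp [pvAlphaRun, hA]
        have h1 := pvAlphaRun_take (a :: t)
        have h2 := pvAlphaRun_drop (a :: t)
        have ih' : ∀ u, pvSplitA (List.dropWhile PySem.Chars.isalpha t) u =
            u ++ pvSplitB (List.dropWhile PySem.Chars.isalpha t) := by
          simpa [List.dropWhile, hA] using ih
        simp only [pvSplitA, pvSplitB, if_pos hpos, h1, h2]
        simp [List.takeWhile, List.dropWhile, hA, ih']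
  case case7 c rest hg hs hu hd hb ih =>
    have h1 : ¬('`' = c ∧ ['`','`'] <+: rest) := by
      rintro ⟨rfl, t, rfl⟩; exact hg t rfl (by simp)
    have h2 : ¬('*' = c ∧ ['*'] <+: rest) := by
      rintro ⟨rfl, t, rfl⟩; exact hs t rfl (by simp)
    have h3 : ¬('_' = c ∧ ['_'] <+: rest) := by
      rintro ⟨rfl, t, rfl⟩; exact hu t rfl (by simp)
    have h4 : ¬('$' = c ∧ ['$'] <+: rest) := by
      rintro ⟨rfl, t, rfl⟩; exact hd t rfl (by simp)
    simp [pvSplitA, pvSplitB, h1, h2, h3, h4, ih]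
    exact fun hc => absurd hc hb
  case case8 => simp [pvSplitA, pvSplitB]

-- ===== VERDICT (by name: the statement is the Claim_ definition above) =====
theorem split_display_units_py_spec : Claim_equal_split_display_units_py := by
  intro text _
  unfold Spec_split_display_units_py split_display_units_py split_display_units_py_alt
  simpa using pvSplit_agree text.toList []
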